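-- pv_equiv track=rewrite | github.com/ZhiGuangLu/qcs | QuantumCorrelationSolver/Body.py | covert_to_decimals
-- ===== SOURCE A (Python) =====
-- def covert_to_decimals(num_list, m):
--     decimals = []
--     n = len(num_list)
--     for k in range(1, n + 1):
--         num = num_list[:k]
--         decimal = 0
--         for i in range(k):
--             decimal += num[i] * (m ** (k - 1 - i))
--         decimals.append(decimal)
--     return decimals
-- ===== SOURCE B (Python) =====
-- def covert_to_decimals(num_list, m):
--     decimals = []
--     d = 0
--     for x in num_list:
--         d = d * m + x
--         decimals.append(d)
--     return decimals
-- ===== Notes on version B (the rewrite author's own statement) =====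
-- stated objective: faster
-- what changed: Replaces the per-prefix recomputation (slice + inner power-sum loop) by a single Horner pass that carries the running decimal value d = d*m + x.
import Mathlib
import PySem

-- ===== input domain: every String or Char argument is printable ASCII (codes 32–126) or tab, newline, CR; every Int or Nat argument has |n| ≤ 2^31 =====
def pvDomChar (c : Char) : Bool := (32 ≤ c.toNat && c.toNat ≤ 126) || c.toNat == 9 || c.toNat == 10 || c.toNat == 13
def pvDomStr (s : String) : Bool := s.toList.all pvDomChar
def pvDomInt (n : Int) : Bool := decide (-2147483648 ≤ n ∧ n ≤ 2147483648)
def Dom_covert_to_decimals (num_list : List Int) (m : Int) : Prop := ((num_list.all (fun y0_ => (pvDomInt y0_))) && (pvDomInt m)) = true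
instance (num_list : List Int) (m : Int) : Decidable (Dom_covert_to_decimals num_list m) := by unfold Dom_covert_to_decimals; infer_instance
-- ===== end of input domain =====

-- B replaces A's per-prefix slice + inner power-sum loop by a single Horner pass (d = d*m + x).
-- ===== PORT A =====
def covert_to_decimals (num_list : List Int) (m : Int) : List Int :=
  let n : Int := num_list.length
  (PySem.List.pyRange 1 (n + 1) 1).foldl (fun decimals k =>
    let num := PySem.List.slice num_list none (some k)
    let decimal := (PySem.List.pyRange 0 k 1).foldl
      (fun d i => d + PySem.List.pyGetD num i 0 * m ^ (k - 1 - i).toNat) 0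
    decimals ++ [decimal]) []

-- ===== PORT B =====
def covert_to_decimals_alt (num_list : List Int) (m : Int) : List Int :=
  (num_list.foldl (fun (p : List Int × Int) x => (p.1 ++ [p.2 * m + x], p.2 * m + x)) ([], 0)).1

-- ===== PRECONDITION & SPEC =====
def Spec_covert_to_decimals (num_list : List Int) (m : Int) (out : List Int) : Prop := out = covert_to_decimals_alt num_list m
instance (num_list : List Int) (m : Int) (out : List Int) : Decidable (Spec_covert_to_decimals num_list m out) := by unfold Spec_covert_to_decimals; infer_instance

-- ===== CLAIM (what is proved, stated in full; the proofs are below) =====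
def Claim_equal_covert_to_decimals : Prop := ∀ (num_list : List Int) (m : Int), Dom_covert_to_decimals num_list m → Spec_covert_to_decimals num_list m (covert_to_decimals num_list m)

-- ===== LEMMAS AND PROOFS =====

-- the value A's inner loop computes for a prefix t, as a sum
def pvSum (m : Int) (t : List Int) : Int :=
  ((List.range t.length).map (fun i => t.getD i 0 * m ^ (t.length - 1 - i))).sum

-- Horner evaluation of a prefix from seed d
def pvHorner (m : Int) (d : Int) (t : List Int) : Int :=
  t.foldl (fun d x => d * m + x) d

lemma pvHorner_append (m d : Int) (t : List Int) (x : Int) :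
    pvHorner m d (t ++ [x]) = pvHorner m d t * m + x := by
  simp [pvHorner]

lemma pvSum_eq_horner (m : Int) (t : List Int) : pvSum m t = pvHorner m 0 t := by
  induction t using List.reverseRecOn with
  | nil => simp [pvSum, pvHorner]
  | append_singleton t x ih =>
    have hlen : (t ++ [x]).length = t.length + 1 := by simp
    have hmap : (List.range (t.length + 1)).map
        (fun i => (t ++ [x]).getD i 0 * m ^ (t.length + 1 - 1 - i))
        = (List.range t.length).map (fun i => t.getD i 0 * m ^ (t.length - 1 - i) * m)
          ++ [x] := by
      rw [List.range_succ, List.map_append]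
      congr 1
      · apply List.map_congr_left
        intro i hi
        have hi' : i < t.length := List.mem_range.mp hi
        have hget : (t ++ [x]).getD i 0 = t.getD i 0 := by
          simp [List.getD, List.getElem?_append_left hi']
        rw [hget]
        have : t.length + 1 - 1 - i = (t.length - 1 - i) + 1 := by omega
        rw [this, pow_succ]; ring
      · simp [List.getD]
    unfold pvSum
    rw [hlen, hmap, List.sum_append]
    have : ((List.range t.length).map
        (fun i => t.getD i 0 * m ^ (t.length - 1 - i) * m)).sum
        = pvSum m t * m := by
      unfold pvSum
      rw [← List.sum_map_mul_right]
    rw [this, ih, pvHorner_append]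
    simp

-- A's inner loop, transliterated, equals pvSum of the prefix
lemma inner_eq_pvSum (m : Int) (num : List Int) (j : Nat) (hlen : num.length = j + 1) :
    (PySem.List.pyRange 0 (1 + (j : Int)) 1).foldl
      (fun d i => d + PySem.List.pyGetD num i 0 * m ^ ((1 + (j : Int)) - 1 - i).toNat) 0
    = pvSum m num := by
  rw [PySem.List.pyRange_one, List.foldl_map]
  have hcast : ((1 + (j : Int)) - 0).toNat = j + 1 := by omega
  rw [hcast]
  have hfold : ∀ (l : List Nat) (c : Int), (∀ i ∈ l, i < j + 1) →
      l.foldl (fun d (i : Nat) =>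
        d + PySem.List.pyGetD num (0 + (i : Int)) 0 * m ^ ((1 + (j : Int)) - 1 - (0 + (i : Int))).toNat) c
      = c + (l.map (fun i => num.getD i 0 * m ^ (num.length - 1 - i))).sum := by
    intro l
    induction l with
    | nil => intro c _; simp
    | cons a as ihl =>
      intro c hmem
      have ha : a < j + 1 := hmem a (List.mem_cons_self ..)
      have h1 : (0 + (a : Int)) = ((a : Nat) : Int) := by omega
      have h2 : ((1 + (j : Int)) - 1 - (0 + (a : Int))).toNat = num.length - 1 - a := by omega
      simp only [List.foldl_cons, h2]
      rw [ihl _ (fun i hi => hmem i (List.mem_cons_of_mem _ hi))]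
      have hget : PySem.List.pyGetD num (0 + (a : Int)) 0 = num.getD a 0 := by
        rw [h1, PySem.List.pyGetD_natCast]
      rw [hget, List.map_cons, List.sum_cons]
      ring
  rw [hfold (List.range (j + 1)) 0 (fun i hi => List.mem_range.mp hi)]
  simp [pvSum, hlen]

-- A equals the map of prefix sums
lemma A_eq_map (num_list : List Int) (m : Int) :
    covert_to_decimals num_list m
      = (List.range num_list.length).map (fun j => pvSum m (num_list.take (j + 1))) := by
  unfold covert_to_decimals
  simp only []
  rw [PySem.List.pyRange_one]
  have hcast : (((num_list.length : Int) + 1) - 1).toNat = num_list.length := by omega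
  rw [hcast, List.foldl_map, PySem.List.foldl_append_singleton_eq_map]
  simp only [List.nil_append]
  apply List.map_congr_left
  intro j hj
  have hj' : j < num_list.length := List.mem_range.mp hj
  have hslice : PySem.List.slice num_list none (some (1 + (j : Int))) = num_list.take (j + 1) := by
    have : (1 + (j : Int)) = (((j + 1 : Nat)) : Int) := by omega
    rw [this, PySem.List.slice_to_natCast]
  rw [hslice, inner_eq_pvSum m _ j (by rw [List.length_take]; omega)]

-- B's fold invariant
lemma B_fold (m : Int) (l : List Int) (acc : List Int) (d : Int) :
    (l.foldl (fun (p : List Int × Int) x => (p.1 ++ [p.2 * m + x], p.2 * m + x)) (acc, d)).1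
      = acc ++ (List.range l.length).map (fun j => pvHorner m d (l.take (j + 1))) := by
  induction l generalizing acc d with
  | nil => simp
  | cons x xs ih =>
    simp only [List.foldl_cons]
    rw [ih]
    rw [List.length_cons, List.range_succ_eq_map, List.map_cons, List.map_map]
    simp [pvHorner, List.take_succ_cons, Function.comp]

-- ===== VERDICT (by name: the statement is the Claim_ definition above) =====
theorem covert_to_decimals_spec : Claim_equal_covert_to_decimals := by
  intro num_list m _
  unfold Spec_covert_to_decimals covert_to_decimals_alt
  rw [B_fold, A_eq_map]
  simp only [List.nil_append]
  apply List.map_congr_left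
  intro j _
  rw [pvSum_eq_horner]
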